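-- pv_equiv track=rewrite | github.com/Radkovv04/LoL-stats-discord | Stats_track.py | compare_with_benchmark
-- ===== SOURCE A (Python) =====
-- def compare_with_benchmark(stats, benchmark):
--     comparison = {key: {"above": 0, "below": 0} for key in benchmark.keys()}
--     for game in stats:
--         for key, value in benchmark.items():
--             if game[key] >= value:
--                 comparison[key]["above"] += 1
--             else:
--                 comparison[key]["below"] += 1
--     return comparison
-- ===== SOURCE B (Python) =====
-- def _bisect_left(a, x):
--     # hand-written bisect_left (no imports): first index i with a[i] >= x in a sorted list
--     lo = 0
--     hi = len(a)
--     while lo < hi: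
--         mid = (lo + hi) // 2
--         if a[mid] < x:
--             lo = mid + 1
--         else:
--             hi = mid
--     return lo
--
--
-- def compare_with_benchmark(stats, benchmark):
--     n = len(stats)
--     comparison = {}
--     for key, value in benchmark.items():
--         vals = sorted(game[key] for game in stats)
--         below = _bisect_left(vals, value)
--         comparison[key] = {"above": n - below, "below": below}
--     return comparison
-- ===== Notes on version B (the rewrite author's own statement) =====
-- stated objective: alternative
-- what changed: B does no comparison counting at all: per benchmark key it sorts the per-game values once and locates the benchmark value with a hand-written binary search (bisect_left), so 'below' is the found index and 'above' is n minus it, instead of A's per-game double-counter increments.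
import Mathlib
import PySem

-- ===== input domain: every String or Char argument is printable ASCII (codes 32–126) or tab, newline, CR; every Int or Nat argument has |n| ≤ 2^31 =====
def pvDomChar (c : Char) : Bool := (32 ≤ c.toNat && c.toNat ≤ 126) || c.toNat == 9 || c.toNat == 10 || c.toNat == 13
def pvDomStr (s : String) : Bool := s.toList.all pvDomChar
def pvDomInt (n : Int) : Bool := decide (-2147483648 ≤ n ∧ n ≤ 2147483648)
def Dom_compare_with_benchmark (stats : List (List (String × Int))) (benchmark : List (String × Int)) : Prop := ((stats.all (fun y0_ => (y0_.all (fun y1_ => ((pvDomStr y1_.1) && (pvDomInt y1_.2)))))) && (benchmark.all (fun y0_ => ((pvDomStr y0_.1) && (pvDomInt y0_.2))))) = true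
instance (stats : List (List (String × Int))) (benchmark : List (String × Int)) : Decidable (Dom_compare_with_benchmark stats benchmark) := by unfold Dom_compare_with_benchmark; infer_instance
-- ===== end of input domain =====

-- B replaces A's per-game double-counter increments by sorting each key's values once and
-- locating the benchmark value with a hand-written binary search (objective: alternative).

-- ===== PORT A =====
-- comparison = {key: {"above": 0, "below": 0} for key in benchmark.keys()}
-- then: for game in stats: for key, value in benchmark.items(): increment "above"/"below".
-- game[key] is first-match association-list lookup; Pre_ guarantees the key is present
-- (KeyError excluded), so the total form .getD 0 is exact there.
-- the body of A's inner loop, for one game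
def pvStep (game : List (String × Int)) (comp : PySem.Dict String (PySem.Dict String Int)) (kv : String × Int) : PySem.Dict String (PySem.Dict String Int) :=
  if (List.lookup kv.1 game).getD 0 ≥ kv.2 then
    comp.modify kv.1 PySem.Dict.empty (fun inner => inner.modify "above" 0 (· + 1))
  else
    comp.modify kv.1 PySem.Dict.empty (fun inner => inner.modify "below" 0 (· + 1))

def compare_with_benchmark (stats : List (List (String × Int))) (benchmark : List (String × Int)) : List (String × List (String × Int)) :=
  let comparison : PySem.Dict String (PySem.Dict String Int) :=
    benchmark.foldl (fun d kv => d.insert kv.1 (PySem.Dict.ofList [("above", 0), ("below", 0)])) PySem.Dict.empty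
  let final :=
    stats.foldl (fun comp game => benchmark.foldl (pvStep game) comp) comparison
  final.items.map (fun p => (p.1, p.2.items))

-- ===== PORT B =====
-- the hand-written _bisect_left of Source B: lo/hi halving loop, fuel bounds the iteration count
-- (hi - lo shrinks each step, so fuel = initial hi suffices; the guard only makes it total).
-- a[mid] is in range whenever lo < hi ≤ len a (the only case the loop reads), so getD 0 is exact.
def pvBisectLoop (a : List Int) (x : Int) : Nat → Nat → Nat → Nat
  | 0, lo, _ => lo
  | fuel + 1, lo, hi =>
    if lo < hi then
      let mid := (lo + hi) / 2
      if a.getD mid 0 < x then pvBisectLoop a x fuel (mid + 1) hi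
      else pvBisectLoop a x fuel lo mid
    else lo

-- for key, value in benchmark.items(): vals = sorted(game[key] for game in stats);
-- below = _bisect_left(vals, value); comparison[key] = {"above": n - below, "below": below}
-- (fresh keys appended in order = map; Pre_ excludes duplicate benchmark keys).
def compare_with_benchmark_alt (stats : List (List (String × Int))) (benchmark : List (String × Int)) : List (String × List (String × Int)) :=
  let n : Int := (stats.length : Int)
  benchmark.map (fun kv =>
    let vals := PySem.List.sorted (stats.map (fun game => (List.lookup kv.1 game).getD 0)) (fun x => x) false
    let below : Nat := pvBisectLoop vals kv.2 vals.length 0 vals.length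
    (kv.1, [("above", n - (below : Int)), ("below", (below : Int))]))

-- ===== PRECONDITION & SPEC =====
-- Pre_ excludes (i) inputs where some game lacks a benchmark key — there A (and B) raise
-- KeyError — and (ii) association lists with duplicate keys, which are not faithful encodings
-- of the Python dict arguments (first-match vs last-wins is an artefact of the encoding).
def Pre_compare_with_benchmark (stats : List (List (String × Int))) (benchmark : List (String × Int)) : Prop :=
  (benchmark.map Prod.fst).Nodup ∧
  (∀ g ∈ stats, (g.map Prod.fst).Nodup) ∧
  (∀ g ∈ stats, ∀ kv ∈ benchmark, (List.lookup kv.1 g).isSome = true)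
instance (stats : List (List (String × Int))) (benchmark : List (String × Int)) : Decidable (Pre_compare_with_benchmark stats benchmark) := by unfold Pre_compare_with_benchmark; infer_instance
def pvWitness_compare_with_benchmark : (List (List (String × Int))) × (List (String × Int)) :=
  ([[("kills", 7), ("deaths", 2)], [("kills", 1), ("deaths", 9)]], [("kills", 5), ("deaths", 4)])

def Spec_compare_with_benchmark (stats : List (List (String × Int))) (benchmark : List (String × Int)) (out : List (String × List (String × Int))) : Prop := out = compare_with_benchmark_alt stats benchmark
instance (stats : List (List (String × Int))) (benchmark : List (String × Int)) (out : List (String × List (String × Int))) : Decidable (Spec_compare_with_benchmark stats benchmark out) := by unfold Spec_compare_with_benchmark; infer_instance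

-- ===== CLAIM (what is proved, stated in full; the proofs are below) =====
def Claim_equal_compare_with_benchmark : Prop := ∀ (stats : List (List (String × Int))) (benchmark : List (String × Int)), Dom_compare_with_benchmark stats benchmark → Pre_compare_with_benchmark stats benchmark → Spec_compare_with_benchmark stats benchmark (compare_with_benchmark stats benchmark)

-- ===== LEMMAS AND PROOFS =====

-- in a (≤)-sorted list, the elements < x are exactly the first countP (· < x) ones
lemma pvSorted_lt_iff (x : Int) : ∀ (a : List Int), a.Pairwise (· ≤ ·) →
    ∀ i, i < a.length → ((a.getD i 0 < x) ↔ i < a.countP (fun y => decide (y < x))) := by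
  intro a
  induction a with
  | nil => intro _ i hi; simp at hi
  | cons hd tl ih =>
    intro hp i hi
    have hhd := (List.pairwise_cons.mp hp).1
    have htl := (List.pairwise_cons.mp hp).2
    by_cases hx : hd < x
    · rw [List.countP_cons]
      cases i with
      | zero => simp [hx]
      | succ j =>
        have hj : j < tl.length := by simpa using hi
        have h2 := ih htl j hj
        simp only [List.getD_cons_succ]
        rw [h2]
        simp [hx]
    · have hc : (hd :: tl).countP (fun y => decide (y < x)) = 0 := by
        rw [List.countP_eq_zero]
        intro y hy
        rcases List.mem_cons.mp hy with h | h
        · simp [h, hx]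
        · have : hd ≤ y := hhd y h
          simp; omega
      rw [hc]
      cases i with
      | zero => simpa using hx
      | succ j =>
        have hj : j < tl.length := by simpa using hi
        have hget : (hd :: tl).getD (j + 1) 0 = tl[j] := by
          simp [List.getD_eq_getElem?_getD, hj]
        have hle : hd ≤ tl[j] := hhd _ (List.getElem_mem hj)
        rw [hget]
        constructor
        · intro h; omega
        · intro h; omega

-- the binary-search loop finds c whenever the first c elements are exactly those < x
lemma pvBisect_eq (a : List Int) (x : Int) (c : Nat)
    (H : ∀ i, i < a.length → ((a.getD i 0 < x) ↔ i < c)) :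
    ∀ fuel lo hi, hi - lo ≤ fuel → lo ≤ c → c ≤ hi → hi ≤ a.length →
      pvBisectLoop a x fuel lo hi = c := by
  intro fuel
  induction fuel with
  | zero => intro lo hi h1 h2 h3 _; unfold pvBisectLoop; omega
  | succ n ih =>
    intro lo hi h1 h2 h3 h4
    unfold pvBisectLoop
    by_cases hlh : lo < hi
    · rw [if_pos hlh]
      simp only
      have hmid₁ : lo ≤ (lo + hi) / 2 := by omega
      have hmid₂ : (lo + hi) / 2 < hi := by omega
      have hmlen : (lo + hi) / 2 < a.length := by omega
      by_cases hm : a.getD ((lo + hi) / 2) 0 < x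
      · rw [if_pos hm]
        have hmc : (lo + hi) / 2 < c := (H _ hmlen).mp hm
        exact ih _ _ (by omega) (by omega) h3 h4
      · rw [if_neg hm]
        have hmc : ¬ ((lo + hi) / 2 < c) := fun h => hm ((H _ hmlen).mpr h)
        exact ih _ _ (by omega) h2 (by omega) (by omega)
    · rw [if_neg hlh]; omega

-- per benchmark entry: B's bisect on the sorted values counts the values < kv.2
lemma pvBelow_eq (stats : List (List (String × Int))) (k : String) (v : Int) :
    (pvBisectLoop (PySem.List.sorted (stats.map (fun game => (List.lookup k game).getD 0)) (fun x => x) false) v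
      (PySem.List.sorted (stats.map (fun game => (List.lookup k game).getD 0)) (fun x => x) false).length 0
      (PySem.List.sorted (stats.map (fun game => (List.lookup k game).getD 0)) (fun x => x) false).length)
    = (stats.map (fun game => (List.lookup k game).getD 0)).countP (fun y => decide (y < v)) := by
  set l := stats.map (fun game => (List.lookup k game).getD 0) with hl
  set a := PySem.List.sorted l (fun x => x) false with ha
  have hperm : a.Perm l := PySem.List.sorted_perm l (fun x => x) false
  have hpw : a.Pairwise (· ≤ ·) := by
    have := PySem.List.sorted_pairwise l (fun x => x)
    simpa using this
  have hcount : a.countP (fun y => decide (y < v)) = l.countP (fun y => decide (y < v)) :=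
    hperm.countP_eq _
  have hcle : a.countP (fun y => decide (y < v)) ≤ a.length := List.countP_le_length
  rw [← hcount]
  exact pvBisect_eq a v _ (pvSorted_lt_iff v a hpw) a.length 0 a.length
    (by omega) (by omega) hcle (le_refl _)

lemma pvStep_getD_ne (game : List (String × Int)) (comp : PySem.Dict String (PySem.Dict String Int)) (kv : String × Int) (k : String) (h : k ≠ kv.1) :
    (pvStep game comp kv).getD k PySem.Dict.empty = comp.getD k PySem.Dict.empty := by
  unfold pvStep; split_ifs <;> rw [PySem.Dict.getD_modify] <;> simp [h]

lemma pvFoldl_getD_not_mem (game : List (String × Int)) (l : List (String × Int)) (comp : PySem.Dict String (PySem.Dict String Int)) (k : String) (h : k ∉ l.map Prod.fst) :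
    (l.foldl (pvStep game) comp).getD k PySem.Dict.empty = comp.getD k PySem.Dict.empty := by
  induction l generalizing comp with
  | nil => rfl
  | cons kv rest ih =>
    simp only [List.map_cons, List.mem_cons, not_or] at h
    rw [List.foldl_cons, ih _ h.2, pvStep_getD_ne _ _ _ _ h.1]

-- one game's inner loop updates exactly the (k,v) entry
lemma pvInner_getD (game : List (String × Int)) (benchmark : List (String × Int)) (hnd : (benchmark.map Prod.fst).Nodup) (k : String) (v : Int) (hmem : (k, v) ∈ benchmark) (comp : PySem.Dict String (PySem.Dict String Int)) :
    (benchmark.foldl (pvStep game) comp).getD k PySem.Dict.empty =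
      (if (List.lookup k game).getD 0 ≥ v then
        (comp.getD k PySem.Dict.empty).modify "above" 0 (· + 1)
      else
        (comp.getD k PySem.Dict.empty).modify "below" 0 (· + 1)) := by
  induction benchmark generalizing comp with
  | nil => simp at hmem
  | cons kv rest ih =>
    simp only [List.map_cons, List.nodup_cons] at hnd
    rcases List.mem_cons.mp hmem with h | h
    · subst h
      rw [List.foldl_cons, pvFoldl_getD_not_mem _ _ _ _ hnd.1]
      unfold pvStep
      split_ifs <;> rw [PySem.Dict.getD_modify] <;> simp
    · have hne : k ≠ kv.1 := by
        intro he; exact hnd.1 (he ▸ (List.mem_map_of_mem (f := Prod.fst) h))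
      rw [List.foldl_cons, ih hnd.2 h, pvStep_getD_ne _ _ _ _ hne]

lemma pvItems_ofList (a b : Int) :
    (PySem.Dict.ofList [("above", a), ("below", b)]).items = [("above", a), ("below", b)] := rfl

lemma pvModify_above (a b : Int) :
    (PySem.Dict.ofList [("above", a), ("below", b)]).modify "above" 0 (· + 1) = PySem.Dict.ofList [("above", a + 1), ("below", b)] := rfl

lemma pvModify_below (a b : Int) :
    (PySem.Dict.ofList [("above", a), ("below", b)]).modify "below" 0 (· + 1) = PySem.Dict.ofList [("above", a), ("below", b + 1)] := rfl

-- the outer loop over the games, per benchmark entry (k,v)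
lemma pvOuter_getD (stats : List (List (String × Int))) (benchmark : List (String × Int)) (hnd : (benchmark.map Prod.fst).Nodup) (k : String) (v : Int) (hmem : (k, v) ∈ benchmark) (comp : PySem.Dict String (PySem.Dict String Int)) (a b : Int) (hc : comp.getD k PySem.Dict.empty = PySem.Dict.ofList [("above", a), ("below", b)]) :
    (stats.foldl (fun comp game => benchmark.foldl (pvStep game) comp) comp).getD k PySem.Dict.empty =
      PySem.Dict.ofList [("above", a + ((stats.countP (fun game => (List.lookup k game).getD 0 ≥ v)) : Int)),
                         ("below", b + ((stats.length : Int) - ((stats.countP (fun game => (List.lookup k game).getD 0 ≥ v)) : Int)))] := by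
  induction stats generalizing comp a b with
  | nil => simpa using hc
  | cons game rest ih =>
    rw [List.foldl_cons]
    have hstep := pvInner_getD game benchmark hnd k v hmem comp
    by_cases hcond : (List.lookup k game).getD 0 ≥ v
    · rw [if_pos hcond, hc, pvModify_above] at hstep
      rw [ih _ _ _ hstep]
      have : (game :: rest).countP (fun game => (List.lookup k game).getD 0 ≥ v) = rest.countP (fun game => (List.lookup k game).getD 0 ≥ v) + 1 := by
        rw [List.countP_cons]; simp [hcond]
      rw [this]
      simp only [List.length_cons]
      congr 1
      simp only [List.cons.injEq, Prod.mk.injEq, true_and, and_true]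
      push_cast
      omega
    · rw [if_neg hcond, hc, pvModify_below] at hstep
      rw [ih _ _ _ hstep]
      have : (game :: rest).countP (fun game => (List.lookup k game).getD 0 ≥ v) = rest.countP (fun game => (List.lookup k game).getD 0 ≥ v) := by
        rw [List.countP_cons]; simp [hcond]
      rw [this]
      simp only [List.length_cons]
      congr 1
      simp only [List.cons.injEq, Prod.mk.injEq, true_and, and_true]
      push_cast
      omega

-- the initial comprehension: items are the benchmark keys with zeroed counters
lemma pvInit_items (benchmark : List (String × Int)) (hnd : (benchmark.map Prod.fst).Nodup) :
    (benchmark.foldl (fun d kv => d.insert kv.1 (PySem.Dict.ofList [("above", 0), ("below", 0)])) (PySem.Dict.empty : PySem.Dict String (PySem.Dict String Int))).items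
      = benchmark.map (fun kv => (kv.1, PySem.Dict.ofList [("above", 0), ("below", 0)])) := by
  have := PySem.Dict.items_foldl_insert_fresh benchmark (fun kv => kv.1)
    (fun _ => PySem.Dict.ofList [("above", (0:Int)), ("below", 0)]) PySem.Dict.empty
    (fun a _ => PySem.Dict.contains_empty _) (by simpa using hnd)
  simpa using this

lemma pvStep_keys (game : List (String × Int)) (comp : PySem.Dict String (PySem.Dict String Int)) (kv : String × Int) (h : kv.1 ∈ comp.keys) :
    (pvStep game comp kv).keys = comp.keys := by
  have hc : comp.contains kv.1 = true := (PySem.Dict.contains_iff_mem_keys _ _).mpr h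
  unfold pvStep
  split_ifs <;> rw [PySem.Dict.keys_modify, PySem.Dict.keys_insert_of_contains _ _ hc]

lemma pvFoldl_keys (game : List (String × Int)) (l : List (String × Int)) (comp : PySem.Dict String (PySem.Dict String Int)) (h : ∀ kv ∈ l, kv.1 ∈ comp.keys) :
    (l.foldl (pvStep game) comp).keys = comp.keys := by
  induction l generalizing comp with
  | nil => rfl
  | cons kv rest ih =>
    have hk := pvStep_keys game comp kv (h kv (List.mem_cons_self))
    rw [List.foldl_cons, ih _ (fun kv' h' => hk ▸ h kv' (List.mem_cons_of_mem _ h')), hk]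

lemma pvFinal_keys (stats : List (List (String × Int))) (benchmark : List (String × Int)) (comp : PySem.Dict String (PySem.Dict String Int)) (h : comp.keys = benchmark.map Prod.fst) :
    (stats.foldl (fun comp game => benchmark.foldl (pvStep game) comp) comp).keys = benchmark.map Prod.fst := by
  induction stats generalizing comp with
  | nil => exact h
  | cons game rest ih =>
    rw [List.foldl_cons]
    exact ih _ (by rw [pvFoldl_keys game benchmark comp
      (fun kv hkv => h ▸ List.mem_map_of_mem hkv), h])

-- A's "above" count and B's bisect index partition the games
lemma pvCounts (stats : List (List (String × Int))) (k : String) (v : Int) :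
    stats.countP (fun game => (List.lookup k game).getD 0 ≥ v)
      + (stats.map (fun game => (List.lookup k game).getD 0)).countP (fun y => decide (y < v))
      = stats.length := by
  induction stats with
  | nil => simp
  | cons g rest ih =>
    simp only [List.map_cons, List.countP_cons, List.length_cons]
    by_cases h : (List.lookup k g).getD 0 ≥ v
    · rw [if_pos (decide_eq_true h), if_neg (by simp only [decide_eq_true_eq]; omega)]
      omega
    · rw [if_neg (by simp only [decide_eq_true_eq]; omega), if_pos (decide_eq_true (by omega))]
      omega

-- ===== VERDICT (by name: the statement is the Claim_ definition above) =====
theorem compare_with_benchmark_spec : Claim_equal_compare_with_benchmark := by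
  intro stats benchmark _ hpre
  obtain ⟨hnd, -, -⟩ := hpre
  unfold Spec_compare_with_benchmark compare_with_benchmark compare_with_benchmark_alt
  simp only
  set init := benchmark.foldl (fun d kv => d.insert kv.1 (PySem.Dict.ofList [("above", (0:Int)), ("below", 0)])) (PySem.Dict.empty : PySem.Dict String (PySem.Dict String Int)) with hinit
  set final := stats.foldl (fun comp game => benchmark.foldl (pvStep game) comp) init with hfinal
  have hinit_items := pvInit_items benchmark hnd
  have hinit_keys : init.keys = benchmark.map Prod.fst := by
    unfold PySem.Dict.keys
    rw [hinit_items, List.map_map]; rfl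
  have hkeys : final.keys = benchmark.map Prod.fst := pvFinal_keys stats benchmark init hinit_keys
  have hitems := PySem.Dict.items_eq_map_keys final (hkeys ▸ hnd) PySem.Dict.empty
  rw [hitems, hkeys, List.map_map, List.map_map]
  apply List.map_congr_left
  intro kv hkv
  have hgetD : init.getD kv.1 PySem.Dict.empty = PySem.Dict.ofList [("above", 0), ("below", 0)] := by
    apply PySem.Dict.getD_of_mem_items
    · rw [hinit_items]; exact List.mem_map_of_mem hkv
    · exact hinit_keys ▸ hnd
  have hA := pvOuter_getD stats benchmark hnd kv.1 kv.2 hkv init 0 0 hgetD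
  simp only [Function.comp_apply]
  rw [hA, pvItems_ofList, pvBelow_eq stats kv.1 kv.2]
  have hcounts := pvCounts stats kv.1 kv.2
  congr 1
  simp only [List.cons.injEq, Prod.mk.injEq, and_true, true_and]
  constructor <;> omega
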